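-- pv_equiv track=rewrite | github.com/Migabaj/uni_list | uni.py | print_out_phrase
-- ===== SOURCE A (Python) =====
-- def print_out_phrase(uni, phrase):
--     i = 0
--     one_atatime = []
--
--     for e, letter in enumerate(uni):
--         if i <= len(phrase) - 1:
--             if phrase[i] == letter:
--                 i += 1
--                 one_atatime.append(uni[:e] + letter.upper() + uni[e + 1:])
--
--     for one in one_atatime:
--         for n, letter in enumerate(one):
--             if letter != uni[n]:
--                 uni = uni[:n] + letter.upper() + uni[n + 1:]
--
--     return uni
-- ===== SOURCE B (Python) =====
-- def print_out_phrase(uni, phrase):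
--     i = 0
--     out = []
--     for ch in uni:
--         if i < len(phrase) and phrase[i] == ch:
--             i += 1
--             out.append(ch.upper())
--         else:
--             out.append(ch)
--     return "".join(out)
-- ===== Notes on version B (the rewrite author's own statement) =====
-- stated objective: faster
-- what changed: Replaces A's two quadratic passes (building a list of full copies of uni with one letter capitalized each, then rescanning uni against every copy and rebuilding it by slicing) with a single left-to-right pass that advances a pointer into phrase and emits each character, uppercased when it greedily matches, joined once at the end.
import Mathlib
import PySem

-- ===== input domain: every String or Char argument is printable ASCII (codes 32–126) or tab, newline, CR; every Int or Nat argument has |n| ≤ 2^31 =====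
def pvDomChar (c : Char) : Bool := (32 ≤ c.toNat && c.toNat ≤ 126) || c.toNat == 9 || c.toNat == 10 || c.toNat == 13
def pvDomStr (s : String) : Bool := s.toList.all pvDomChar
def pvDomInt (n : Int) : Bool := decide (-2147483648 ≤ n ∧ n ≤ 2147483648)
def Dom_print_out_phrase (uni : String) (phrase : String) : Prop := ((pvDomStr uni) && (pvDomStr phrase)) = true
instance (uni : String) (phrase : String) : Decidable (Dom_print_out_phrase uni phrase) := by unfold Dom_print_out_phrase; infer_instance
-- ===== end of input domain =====

-- B replaces A's two quadratic passes (a list of one-letter-capitalized copies of uni, then a merge scan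
-- per copy) by one linear pass with a pointer into phrase; objective: faster (asymptotic).
-- ===== PORT A =====
-- uni[:e] + letter.upper() + uni[e+1:]  (letter.upper() on a 1-char string = one upperChar)
def pvSliceSet (u : List Char) (e : Int) (c : Char) : List Char :=
  PySem.List.slice u none (some e) ++ [PySem.Chars.upperChar c] ++ PySem.List.slice u (some (e + 1)) none

-- body of A's first loop: state (i, one_atatime)
def pvAStep (ps : List Char) (u : List Char) (st : Int × List (List Char)) (p : Int × Char) :
    Int × List (List Char) :=
  if st.1 ≤ PySem.List.len ps - 1 then
    match PySem.List.pyGet? ps st.1 with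
    | some c => if c = p.2 then (st.1 + 1, st.2 ++ [pvSliceSet u p.1 p.2]) else st
    | none => st  -- unreachable totalization guard: 0 ≤ i ≤ len(phrase)-1 keeps phrase[i] in range
  else st

-- body of A's inner second loop: if letter != uni[n]: uni = uni[:n] + letter.upper() + uni[n+1:]
def pvInnerStep (st : List Char) (p : Int × Char) : List Char :=
  match PySem.List.pyGet? st p.1 with
  | some c => if p.2 ≠ c then pvSliceSet st p.1 p.2 else st
  | none => st  -- unreachable totalization guard: every `one` has the same length as uni

def print_out_phrase (uni : String) (phrase : String) : String :=
  let u := uni.toList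
  let ps := phrase.toList
  let ones := ((PySem.List.enumerate u 0).foldl (pvAStep ps u) (0, [])).2
  String.ofList (ones.foldl (fun cur one => (PySem.List.enumerate one 0).foldl pvInnerStep cur) u)

-- ===== PORT B =====
-- B's loop: walk uni once, advancing a pointer into phrase (here: the remaining suffix of phrase)
def pvBGo : List Char → List Char → List Char
  | [], _ => []
  | c :: cs, [] => c :: pvBGo cs []
  | c :: cs, p :: ps => if p = c then PySem.Chars.upperChar c :: pvBGo cs ps else c :: pvBGo cs (p :: ps)

def print_out_phrase_alt (uni : String) (phrase : String) : String :=
  String.ofList (pvBGo uni.toList phrase.toList)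

-- ===== PRECONDITION & SPEC =====
def Spec_print_out_phrase (uni : String) (phrase : String) (out : String) : Prop := out = print_out_phrase_alt uni phrase
instance (uni : String) (phrase : String) (out : String) : Decidable (Spec_print_out_phrase uni phrase out) := by unfold Spec_print_out_phrase; infer_instance

-- ===== CLAIM (what is proved, stated in full; the proofs are below) =====
def Claim_equal_print_out_phrase : Prop := ∀ (uni : String) (phrase : String), Dom_print_out_phrase uni phrase → Spec_print_out_phrase uni phrase (print_out_phrase uni phrase)

-- ===== LEMMAS AND PROOFS =====

-- greedy match flags: one Bool per character of the first list
def pvMfl : List Char → List Char → List Bool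
  | [], _ => []
  | _ :: cs, [] => false :: pvMfl cs []
  | c :: cs, p :: ps => if p = c then true :: pvMfl cs ps else false :: pvMfl cs (p :: ps)

-- apply flags: uppercase exactly the flagged positions
def pvApp (fl : List Bool) (u : List Char) : List Char :=
  List.zipWith (fun b c => if b then PySem.Chars.upperChar c else c) fl u

-- the per-position effect of A's inner loop
def pvMergeC (a o : Char) : Char := if o ≠ a then PySem.Chars.upperChar o else a

-- remaining (unmatched) suffix of the phrase after scanning the first list
def pvMrem : List Char → List Char → List Char
  | [], rem => rem
  | _ :: cs, [] => pvMrem cs []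
  | c :: cs, p :: ps => if p = c then pvMrem cs ps else pvMrem cs (p :: ps)

-- the list one_atatime that A's first loop builds (absolute index k into u)
def pvSel (u : List Char) : List Char → List Char → Nat → List (List Char)
  | [], _, _ => []
  | _ :: cs, [], k => pvSel u cs [] (k + 1)
  | c :: cs, p :: ps, k =>
      if p = c then (u.set k (PySem.Chars.upperChar c)) :: pvSel u cs ps (k + 1)
      else pvSel u cs (p :: ps) (k + 1)

lemma pvCharLe (a b : Char) : a ≤ b ↔ a.toNat ≤ b.toNat := by
  rw [Char.le_def, UInt32.le_iff_toNat_le]; rfl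

lemma pvUpIdem (c : Char) :
    PySem.Chars.upperChar (PySem.Chars.upperChar c) = PySem.Chars.upperChar c := by
  unfold PySem.Chars.upperChar PySem.Chars.islower
  split
  · rename_i h
    simp only [Bool.and_eq_true, decide_eq_true_eq, pvCharLe] at h
    have ha : ('a' : Char).toNat = 97 := by decide
    have hz : ('z' : Char).toNat = 122 := by decide
    have hv : (c.toNat - 32).isValidChar := by left; omega
    have hd : (Char.ofNat (c.toNat - 32)).toNat = c.toNat - 32 := by
      rw [Char.toNat_ofNat, if_pos hv]
    rw [if_neg]
    simp only [Bool.and_eq_true, decide_eq_true_eq, pvCharLe, not_and, ha, hz, hd]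
    omega
  · rfl

lemma pvSliceSet_natCast (u : List Char) (k : Nat) (c : Char) (hk : k < u.length) :
    pvSliceSet u (k : Int) c = u.set k (PySem.Chars.upperChar c) := by
  have h1 : ((k:Int) + 1) = ((k+1 : Nat) : Int) := by push_cast; ring
  unfold pvSliceSet
  rw [h1, PySem.List.slice_to_natCast, PySem.List.slice_from_natCast,
      List.set_eq_take_cons_drop _ hk]
  simp

lemma pvSetDrop {α : Type} (u : List α) (k:Nat) (x:α) : (u.set k x).drop (k+1) = u.drop (k+1) := by
  rw [List.drop_set, if_pos (by omega)]

lemma pvSetTake {α : Type} (u : List α) (k:Nat) (x:α) (h : k < u.length) : (u.set k x).take (k+1) = u.take k ++ [x] := by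
  rw [List.take_set, List.take_add_one, List.getElem?_eq_getElem h, List.set_append]
  simp [Nat.min_eq_left h.le]

lemma pvInnerStep_eq (cur : List Char) (k : Nat) (o : Char) (hk : k < cur.length) :
    pvInnerStep cur ((k : Int), o) = cur.set k (pvMergeC cur[k] o) := by
  unfold pvInnerStep
  have hg : PySem.List.pyGet? cur (k : Int) = some cur[k] := by
    simp [List.getElem?_eq_getElem hk]
  rw [hg]
  simp only []
  by_cases ho : o = cur[k]
  · rw [if_neg (by simp [ho])]
    unfold pvMergeC
    rw [if_neg (by simp [ho])]
    exact (List.set_getElem_self hk).symm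
  · rw [if_pos (by simp [ho]), pvSliceSet_natCast _ _ _ hk]
    unfold pvMergeC
    rw [if_pos (by simp [ho])]

lemma pvI1 : ∀ (one cur : List Char) (k : Nat), cur.length = k + one.length →
    (PySem.List.enumerate one (k : Int)).foldl pvInnerStep cur
      = cur.take k ++ List.zipWith pvMergeC (cur.drop k) one := by
  intro one
  induction one with
  | nil =>
      intro cur k h
      simp only [List.length_nil, Nat.add_zero] at h
      rw [PySem.List.enumerate_nil]
      simp [← h]
  | cons o os ih =>
      intro cur k h
      have hk : k < cur.length := by simp at h; omega
      rw [PySem.List.enumerate_cons, List.foldl_cons, pvInnerStep_eq cur k o hk,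
          show ((k:Int) + 1) = ((k+1 : Nat) : Int) by push_cast; ring,
          ih _ (k+1) (by simp at h ⊢; omega)]
      rw [pvSetTake _ _ _ hk, pvSetDrop, List.drop_eq_getElem_cons hk]
      simp [List.zipWith]

lemma pvZ (u : List Char) (fl : List Bool) (k : Nat) (hk : k < u.length) (hfl : fl.length = u.length) :
    List.zipWith pvMergeC (pvApp fl u) (u.set k (PySem.Chars.upperChar u[k]))
      = pvApp (fl.set k true) u := by
  unfold pvApp
  apply List.ext_getElem
  · simp [hfl]
  · intro n h1 h2
    have hn : n < u.length := by simp [hfl] at h1; omega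
    have hfn : n < fl.length := by omega
    simp only [List.getElem_zipWith, List.getElem_set]
    unfold pvMergeC
    by_cases hkn : k = n
    · subst hkn
      by_cases hb : fl[k]
      · simp [hb]
      · simp only [hb, if_false, Bool.false_eq_true]
        by_cases hc : PySem.Chars.upperChar u[k] = u[k] <;> simp [hc, pvUpIdem]
    · simp only [if_neg hkn]
      by_cases hb : fl[n]
      · simp only [hb, if_true]
        by_cases hc : u[n] = PySem.Chars.upperChar u[n]
        · simp [← hc]
        · simp [hc]
      · simp [hb]

lemma pvA1 (u ps : List Char) : ∀ (us rem : List Char) (k : Nat) (acc : List (List Char)),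
    us = u.drop k → rem.length ≤ ps.length → ps.drop (ps.length - rem.length) = rem →
    (PySem.List.enumerate us (k : Int)).foldl (pvAStep ps u) (((ps.length - rem.length : Nat) : Int), acc)
      = (((ps.length - (pvMrem us rem).length : Nat) : Int), acc ++ pvSel u us rem k) := by
  intro us
  induction us with
  | nil =>
      intro rem k acc hus hle hd
      rw [PySem.List.enumerate_nil]
      simp [pvMrem, pvSel]
  | cons c cs ih =>
      intro rem k acc hus hle hd
      have hku : k < u.length := by
        by_contra hh
        rw [List.drop_eq_nil_of_le (by omega)] at hus
        exact List.cons_ne_nil _ _ hus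
      have hcs : cs = u.drop (k+1) := by
        rw [← List.tail_drop, ← hus]
        rfl
      rw [PySem.List.enumerate_cons, List.foldl_cons]
      cases rem with
      | nil =>
          have hstep : pvAStep ps u ((((ps.length - ([] : List Char).length : Nat) : Int)), acc) ((k:Int), c)
              = ((((ps.length - ([] : List Char).length : Nat) : Int)), acc) := by
            unfold pvAStep
            rw [if_neg]
            simp [PySem.List.len_eq]
          rw [hstep, show ((k:Int) + 1) = ((k+1 : Nat) : Int) by push_cast; ring,
              ih [] (k+1) acc hcs (by simp) (by simp)]
          simp [pvMrem, pvSel]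
      | cons p ps' =>
          have hlen : (p :: ps').length = ps'.length + 1 := by simp
          have hlt : ps.length - (p :: ps').length < ps.length := by omega
          have hget : PySem.List.pyGet? ps (((ps.length - (p :: ps').length : Nat) : Int)) = some p := by
            rw [PySem.List.pyGet?_natCast]
            have h0 : ps[ps.length - (p :: ps').length + 0]? = some p := by
              rw [← List.getElem?_drop, hd]
              rfl
            simpa using h0
          have hguard : (((ps.length - (p :: ps').length : Nat) : Int)) ≤ PySem.List.len ps - 1 := by
            simp [PySem.List.len_eq]
            omega
          by_cases hpc : p = c
          · have hstep : pvAStep ps u ((((ps.length - (p :: ps').length : Nat) : Int)), acc) ((k:Int), c)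
                = ((((ps.length - ps'.length : Nat) : Int)), acc ++ [pvSliceSet u (k:Int) c]) := by
              unfold pvAStep
              rw [if_pos hguard]
              simp only [hget]
              rw [if_pos hpc]
              have : (((ps.length - (p :: ps').length : Nat) : Int)) + 1
                  = (((ps.length - ps'.length : Nat) : Int)) := by
                push_cast [hlen]
                omega
              rw [this]
            have hd' : ps.drop (ps.length - ps'.length) = ps' := by
              have : ps.length - ps'.length = (ps.length - (p :: ps').length) + 1 := by omega
              rw [this, ← List.tail_drop, hd]
              rfl
            rw [hstep, show ((k:Int) + 1) = ((k+1 : Nat) : Int) by push_cast; ring,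
                ih ps' (k+1) _ hcs (by omega) hd']
            have hsel : pvSel u (c :: cs) (p :: ps') k
                = (u.set k (PySem.Chars.upperChar c)) :: pvSel u cs ps' (k+1) := by
              simp [pvSel, hpc]
            have hmr : pvMrem (c :: cs) (p :: ps') = pvMrem cs ps' := by
              simp [pvMrem, hpc]
            rw [hsel, hmr, pvSliceSet_natCast _ _ _ hku]
            simp
          · have hstep : pvAStep ps u ((((ps.length - (p :: ps').length : Nat) : Int)), acc) ((k:Int), c)
                = ((((ps.length - (p :: ps').length : Nat) : Int)), acc) := by
              unfold pvAStep
              rw [if_pos hguard]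
              simp only [hget]
              rw [if_neg hpc]
            rw [hstep, show ((k:Int) + 1) = ((k+1 : Nat) : Int) by push_cast; ring,
                ih (p :: ps') (k+1) acc hcs hle hd]
            simp [pvMrem, pvSel, hpc]

lemma pvAppLen (fl : List Bool) (u : List Char) (h : fl.length = u.length) :
    (pvApp fl u).length = u.length := by
  simp [pvApp, h]

lemma pvF (u : List Char) : ∀ (us rem : List Char) (k : Nat) (fl : List Bool),
    us = u.drop k → fl.length = u.length →
    (pvSel u us rem k).foldl (fun cur one => (PySem.List.enumerate one 0).foldl pvInnerStep cur) (pvApp fl u)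
      = pvApp (fl.take k ++ List.zipWith or (fl.drop k) (pvMfl us rem)) u := by
  intro us
  induction us with
  | nil =>
      intro rem k fl hus hfl
      have hk : u.length ≤ k := List.drop_eq_nil_iff.mp hus.symm
      simp [pvSel, pvMfl, List.take_of_length_le (le_trans (le_of_eq hfl) hk)]
  | cons c cs ih =>
      intro rem k fl hus hfl
      have hku : k < u.length := by
        by_contra hh
        rw [List.drop_eq_nil_of_le (by omega)] at hus
        exact List.cons_ne_nil _ _ hus
      have hdk : u.drop k = u[k] :: u.drop (k+1) := List.drop_eq_getElem_cons hku
      have hc : c = u[k] := by rw [hdk] at hus; exact (List.cons_eq_cons.mp hus).1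
      have hcs : cs = u.drop (k+1) := by rw [hdk] at hus; exact (List.cons_eq_cons.mp hus).2
      have hflk : k < fl.length := by omega
      have hfdk : fl.drop k = fl[k] :: fl.drop (k+1) := List.drop_eq_getElem_cons hflk
      have htk1 : fl.take (k+1) = fl.take k ++ [fl[k]] := by
        rw [List.take_add_one, List.getElem?_eq_getElem hflk]
        rfl
      have hunmatched : ∀ rem', pvSel u (c :: cs) rem k = pvSel u cs rem' (k+1) →
          pvMfl (c :: cs) rem = false :: pvMfl cs rem' →
          (pvSel u (c :: cs) rem k).foldl (fun cur one => (PySem.List.enumerate one 0).foldl pvInnerStep cur) (pvApp fl u)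
            = pvApp (fl.take k ++ List.zipWith or (fl.drop k) (pvMfl (c :: cs) rem)) u := by
        intro rem' hsel hmfl
        rw [hsel, hmfl, ih rem' (k+1) fl hcs hfl, hfdk]
        simp only [List.zipWith_cons_cons, htk1, Bool.or_false]
        rw [List.append_assoc, List.singleton_append]
      cases rem with
      | nil => exact hunmatched [] (by simp [pvSel]) (by simp [pvMfl])
      | cons p ps' =>
          by_cases hpc : p = c
          · have hsel : pvSel u (c :: cs) (p :: ps') k
                = (u.set k (PySem.Chars.upperChar c)) :: pvSel u cs ps' (k+1) := by
              simp [pvSel, hpc]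
            rw [hsel, List.foldl_cons]
            have hlen1 : (pvApp fl u).length = 0 + (u.set k (PySem.Chars.upperChar c)).length := by
              simp [pvAppLen fl u hfl]
            have hstep := pvI1 (u.set k (PySem.Chars.upperChar c)) (pvApp fl u) 0 hlen1
            rw [show ((0:Nat):Int) = 0 by rfl] at hstep
            rw [hstep]
            simp only [List.take_zero, List.drop_zero, List.nil_append]
            have hz := pvZ u fl k hku hfl
            rw [← hc] at hz
            rw [hz]
            rw [ih ps' (k+1) (fl.set k true) hcs (by simp [hfl])]
            rw [pvSetTake fl k true hflk, pvSetDrop]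
            have hmfl : pvMfl (c :: cs) (p :: ps') = true :: pvMfl cs ps' := by
              simp [pvMfl, hpc]
            rw [hmfl, hfdk]
            simp only [List.zipWith_cons_cons, Bool.or_true, List.append_assoc, List.singleton_append]
          · exact hunmatched (p :: ps') (by simp [pvSel, hpc]) (by simp [pvMfl, hpc])

lemma pvMfl_length (cs : List Char) : ∀ ps, (pvMfl cs ps).length = cs.length := by
  induction cs with
  | nil => intro ps; simp [pvMfl]
  | cons c cs ih =>
      intro ps
      cases ps with
      | nil => simp [pvMfl, ih]
      | cons p ps => by_cases h : p = c <;> simp [pvMfl, h, ih]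

lemma pvB1 (cs : List Char) : ∀ ps, pvBGo cs ps = pvApp (pvMfl cs ps) cs := by
  induction cs with
  | nil => intro ps; simp [pvBGo, pvMfl, pvApp]
  | cons c cs ih =>
      intro ps
      cases ps with
      | nil => simp [pvBGo, pvMfl, pvApp, ih]
      | cons p ps => by_cases h : p = c <;> simp [pvBGo, pvMfl, pvApp, h, ih]

lemma pvApp_replicate_false (u : List Char) : pvApp (List.replicate u.length false) u = u := by
  induction u with
  | nil => simp [pvApp]
  | cons c u ih => simpa [pvApp, List.replicate_succ] using ih

lemma pvZipOr_replicate_false (g : List Bool) :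
    List.zipWith or (List.replicate g.length false) g = g := by
  induction g with
  | nil => simp
  | cons b g ih => simpa [List.replicate_succ] using ih

lemma pvMain (u ps : List Char) :
    (((PySem.List.enumerate u 0).foldl (pvAStep ps u) (0, [])).2).foldl
        (fun cur one => (PySem.List.enumerate one 0).foldl pvInnerStep cur) u
      = pvBGo u ps := by
  have h1 := pvA1 u ps u ps 0 [] (by simp) (le_refl _) (by simp)
  rw [show (((ps.length - ps.length : Nat) : Int)) = 0 from by simp] at h1
  rw [show ((0:Nat):Int) = 0 from rfl] at h1
  rw [h1]
  simp only [List.nil_append]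
  have h2 := pvF u u ps 0 (List.replicate u.length false) (by simp) (by simp)
  rw [pvApp_replicate_false] at h2
  rw [h2]
  simp only [List.take_zero, List.drop_zero, List.nil_append]
  rw [show List.replicate u.length false = List.replicate (pvMfl u ps).length false from by
        rw [pvMfl_length]]
  rw [pvZipOr_replicate_false]
  exact (pvB1 u ps).symm

-- ===== VERDICT (by name: the statement is the Claim_ definition above) =====
theorem print_out_phrase_spec : Claim_equal_print_out_phrase := by
  intro uni phrase _
  unfold Spec_print_out_phrase print_out_phrase print_out_phrase_alt
  exact congrArg String.ofList (pvMain uni.toList phrase.toList)
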